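-- pv_equiv track=rewrite | github.com/pedrob37/AdventOfCode2022 | 07.py | calc_directory_sizes
-- ===== SOURCE A (Python) =====
-- def calc_directory_sizes(command_line_output):
--     # Iterate through lines, keeping track of what directories we are in
--     directories_size_dict = {}
--     current_directories = []
--     for line in command_line_output:
--         if line.startswith("$ cd .."):
--             current_directories.pop()
--         elif line.startswith("$ cd"):
--             # NOTE: This didn't originally account for the fact that folders in DIFFERENT directories could share names!
--             current_directories.append(line.split()[2])
--             directories_size_dict["/".join(current_directories)] = 0
--         elif line.split()[0].isnumeric():
--             # Add size to all directories/ subdirectories we are currently in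
--             for ID, _ in enumerate(current_directories):
--                 directories_size_dict["/".join(current_directories[:ID+1])] += int(line.split()[0])
--
--     return directories_size_dict
-- ===== SOURCE B (Python) =====
-- def calc_directory_sizes(command_line_output):
--     # Recursive-descent parse of the terminal session: each directory body is
--     # parsed as a unit, each file size is counted ONCE into the local subtree
--     # total, and subtotals are propagated to the parent on exit -- instead of
--     # A's adding every file size to every ancestor prefix at file time.
--     sizes = {}
--     n = len(command_line_output)
--
--     def walk(i, path):
--         # Parse one directory body starting at line i.
--         # Returns (subtree total, index just after the body).
--         total = 0
--         while i < n:
--             line = command_line_output[i]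
--             if line.startswith("$ cd .."):
--                 return total, i + 1
--             if line.startswith("$ cd"):
--                 name = line.split()[2]
--                 key = name if path is None else path + "/" + name
--                 sizes[key] = 0
--                 sub, i = walk(i + 1, key)
--                 sizes[key] += sub
--                 total += sub
--             else:
--                 tok = line.split()[0]
--                 if tok.isnumeric():
--                     total += int(tok)
--                 i += 1
--         return total, i
--
--     walk(0, None)
--     return sizes
-- ===== Notes on version B (the rewrite author's own statement) =====
-- stated objective: alternative
-- what changed: B is a recursive-descent parser of the session: it parses each directory body as a unit, counts each file size once into a local subtree total and propagates subtotals to the parent key on exit, instead of A's flat stack walk that re-joins every ancestor prefix and adds every file size to every ancestor at file time.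
import Mathlib
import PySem

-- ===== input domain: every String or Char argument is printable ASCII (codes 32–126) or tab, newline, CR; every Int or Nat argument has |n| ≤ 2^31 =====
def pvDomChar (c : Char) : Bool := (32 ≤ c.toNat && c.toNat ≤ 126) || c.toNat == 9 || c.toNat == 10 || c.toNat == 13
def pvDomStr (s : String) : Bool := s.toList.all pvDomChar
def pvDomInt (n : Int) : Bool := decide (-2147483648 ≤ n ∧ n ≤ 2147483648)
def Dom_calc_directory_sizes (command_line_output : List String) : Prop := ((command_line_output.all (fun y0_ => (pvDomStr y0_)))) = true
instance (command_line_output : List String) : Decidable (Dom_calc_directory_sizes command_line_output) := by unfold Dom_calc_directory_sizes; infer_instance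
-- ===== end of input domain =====

-- B is a recursive-descent parser of the session (each directory body parsed as a
-- unit, file sizes counted once locally and subtotals propagated to the parent on
-- exit) instead of A's flat stack walk that adds every size to every ancestor.

-- ===== PORT A =====
-- one iteration of A's `for line in command_line_output` loop over the state
-- (directories_size_dict, current_directories); str.isnumeric coincides with
-- strIsdigit on the ASCII domain; the `.getD` defaults are only reached where
-- the Python raises (pop from [], IndexError on split()[2]/[0]) — outside Pre_.
def calcA_step (st : PySem.Dict String Int × List String) (line : String) :
    PySem.Dict String Int × List String :=
  let d := st.1; let cur := st.2
  if PySem.Str.startswith line "$ cd .." then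
    (d, ((PySem.List.pop? cur).map (·.2)).getD cur)              -- current_directories.pop()
  else if PySem.Str.startswith line "$ cd" then
    let cur' := cur ++ [(PySem.List.pyGet? (PySem.Str.split₀ line) 2).getD ""]
    (d.insert (PySem.Str.join "/" cur') 0, cur')                 -- dict["/".join(...)] = 0
  else
    let tok := (PySem.List.pyGet? (PySem.Str.split₀ line) 0).getD ""
    if PySem.Str.strIsdigit tok then
      ((PySem.List.enumerate cur).foldl (fun d p =>              -- for ID, _ in enumerate(...)
        d.modify (PySem.Str.join "/" (PySem.List.slice cur none (some (p.1 + 1)))) 0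
          (· + (PySem.Int.ofStr? tok).getD 0)) d, cur)           -- dict[key] += int(tok)
    else (d, cur)

def calc_directory_sizes (command_line_output : List String) : List (String × Int) :=
  (command_line_output.foldl calcA_step (PySem.Dict.empty, [])).1.items

-- ===== PORT B =====
-- Source B's `walk(i, path)`: the remaining lines stand for the index i (Python's
-- `i` is the number of consumed lines; returning the remaining suffix is the
-- same information), `fuel` only bounds the recursion (one unit per line, never
-- exhausted when fuel ≥ number of lines); the while loop over siblings is the
-- tail recursion at the same `path`, the nested call on "$ cd" is the inner
-- recursive call, and `total` is accumulated through the returned first component.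
-- `name if path is None else path + "/" + name`
def mkKey (path : Option String) (name : String) : String :=
  match path with | none => name | some p => p ++ "/" ++ name

def walkB (fuel : Nat) (lines : List String) (path : Option String)
    (d : PySem.Dict String Int) : Int × List String × PySem.Dict String Int :=
  match fuel, lines with
  | _, [] => (0, [], d)
  | 0, ls => (0, ls, d)                                          -- fuel guard, unreachable
  | f+1, line :: rest =>
    if PySem.Str.startswith line "$ cd .." then (0, rest, d)     -- return total, i+1
    else if PySem.Str.startswith line "$ cd" then
      let name := (PySem.List.pyGet? (PySem.Str.split₀ line) 2).getD ""
      let key := mkKey path name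
      let r1 := walkB f rest (some key) (d.insert key 0)         -- sizes[key] = 0; sub, i = walk(i+1, key)
      let d2 := r1.2.2.modify key 0 (· + r1.1)                   -- sizes[key] += sub
      let r2 := walkB f r1.2.1 path d2                           -- while loop continues
      (r1.1 + r2.1, r2.2.1, r2.2.2)                              -- total += sub
    else
      let tok := (PySem.List.pyGet? (PySem.Str.split₀ line) 0).getD ""
      if PySem.Str.strIsdigit tok then
        let r := walkB f rest path d
        ((PySem.Int.ofStr? tok).getD 0 + r.1, r.2.1, r.2.2)      -- total += int(tok)
      else walkB f rest path d

def calc_directory_sizes_alt (command_line_output : List String) : List (String × Int) :=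
  (walkB command_line_output.length command_line_output none PySem.Dict.empty).2.2.items

-- ===== PRECONDITION & SPEC =====
def pvIsPop (line : String) : Bool := PySem.Str.startswith line "$ cd .."
def pvIsPush (line : String) : Bool := !pvIsPop line && PySem.Str.startswith line "$ cd"
-- Pre_ excludes exactly the inputs on which the Python A raises: a "$ cd" line with
-- fewer than 3 whitespace tokens (IndexError on split()[2]), a non-cd line that is
-- all whitespace (IndexError on split()[0]), and a "$ cd .." line reached with an
-- empty directory stack (IndexError on pop()).
def Pre_calc_directory_sizes (command_line_output : List String) : Prop :=
  (∀ l ∈ command_line_output, pvIsPush l = true → 3 ≤ (PySem.Str.split₀ l).length) ∧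
  (∀ l ∈ command_line_output, PySem.Str.startswith l "$ cd" = false → PySem.Str.split₀ l ≠ []) ∧
  (∀ i, (h : i < command_line_output.length) → pvIsPop command_line_output[i] = true →
    (command_line_output.take i).countP (fun l => pvIsPop l) <
      (command_line_output.take i).countP (fun l => pvIsPush l))
instance (command_line_output : List String) : Decidable (Pre_calc_directory_sizes command_line_output) := by
  unfold Pre_calc_directory_sizes; infer_instance
def pvWitness_calc_directory_sizes : List String :=
  ["$ cd /", "$ ls", "100 a.txt", "$ cd b", "5 c", "$ cd ..", "7 d"]
def Spec_calc_directory_sizes (command_line_output : List String) (out : List (String × Int)) : Prop := out = calc_directory_sizes_alt command_line_output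
instance (command_line_output : List String) (out : List (String × Int)) : Decidable (Spec_calc_directory_sizes command_line_output out) := by unfold Spec_calc_directory_sizes; infer_instance

-- ===== CLAIM (what is proved, stated in full; the proofs are below) =====
def Claim_equal_calc_directory_sizes : Prop := ∀ (command_line_output : List String), Dom_calc_directory_sizes command_line_output → Pre_calc_directory_sizes command_line_output → Spec_calc_directory_sizes command_line_output (calc_directory_sizes command_line_output)

-- ===== LEMMAS AND PROOFS =====

-- the full path keys of all prefixes of the name stack (what A keeps bumping)
def keysOf (cur : List String) : List String :=
  (List.range cur.length).map (fun i => PySem.Str.join "/" (cur.take (i + 1)))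

-- A's key for the current stack, as B's `path` parameter
def optKey (cur : List String) : Option String :=
  if cur = [] then none else some (PySem.Str.join "/" cur)

-- add S to every key of ks (A's inner `for ID, _ in enumerate(...)` loop, abstracted)
def addAll (ks : List String) (S : Int) (d : PySem.Dict String Int) : PySem.Dict String Int :=
  ks.foldl (fun d k => d.modify k 0 (· + S)) d

-- appending one more component to a nonempty join
theorem chars_join_concat (sep : List Char) (ps : List (List Char)) (p : List Char) (h : ps ≠ []) :
    PySem.Chars.join sep (ps ++ [p]) = PySem.Chars.join sep ps ++ sep ++ p := by
  induction ps with
  | nil => simp at h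
  | cons q ps ih =>
      cases ps with
      | nil => simp [PySem.Chars.join_cons_cons, PySem.Chars.join_singleton]
      | cons r rest =>
          simp only [List.cons_append] at ih ⊢
          rw [PySem.Chars.join_cons_cons sep q r (rest ++ [p]), ih (by simp),
            PySem.Chars.join_cons_cons]
          simp

theorem join_concat (xs : List String) (x : String) (h : xs ≠ []) :
    PySem.Str.join "/" (xs ++ [x]) = PySem.Str.join "/" xs ++ "/" ++ x := by
  rw [← String.toList_inj]
  simp only [PySem.Str.toList_join, List.map_append, List.map_cons, List.map_nil,
    String.toList_append]
  rw [chars_join_concat _ _ _ (by simpa using h)]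

theorem join_single (x : String) : PySem.Str.join "/" [x] = x := by
  rw [← String.toList_inj]
  simp [PySem.Str.toList_join, PySem.Chars.join_singleton]

theorem popA_eq_dropLast (cur : List String) :
    ((PySem.List.pop? cur).map (·.2)).getD cur = cur.dropLast := by
  rcases List.eq_nil_or_concat cur with h | ⟨ys, y, rfl⟩
  · subst h; simp [PySem.List.pop?]
  · simp only [List.concat_eq_append]
    rw [PySem.List.pop?_last]
    simp

-- A's size-line inner loop is addAll over the prefix keys
theorem sizeLoop_eq (cur : List String) (d : PySem.Dict String Int) (S : Int) :
    (PySem.List.enumerate cur).foldl (fun d p =>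
        d.modify (PySem.Str.join "/" (PySem.List.slice cur none (some (p.1 + 1)))) 0 (· + S)) d
      = addAll (keysOf cur) S d := by
  rw [PySem.List.enumerate_eq_map_pyRange cur ""]
  unfold keysOf addAll
  rw [PySem.List.len_eq, PySem.List.pyRange_zero_natCast, List.map_map,
    List.foldl_map, List.foldl_map]
  apply PySem.List.foldl_congr_mem
  intro acc k hk
  simp only [List.mem_range] at hk
  simp only [Function.comp_apply]
  rw [PySem.List.slice_to cur (by omega)]
  congr 2

-- B's incremental key is A's join of the extended stack
theorem key_eq (cur : List String) (name : String) :
    mkKey (optKey cur) name = PySem.Str.join "/" (cur ++ [name]) := by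
  unfold mkKey optKey
  by_cases h : cur = []
  · subst h; simp [join_single]
  · rw [if_neg h, join_concat _ _ h]

-- ---------- dictionary bump lemmas ----------

theorem map_items_of_not_contains (d : PySem.Dict String Int) (k : String) (v : Int)
    (h : d.contains k = false) :
    d.items.map (fun p => if (p.1 == k) = true then (k, v) else p) = d.items := by
  conv_rhs => rw [← List.map_id d.items]
  apply List.map_congr_left; intro p hp
  have hne : p.1 ≠ k := by
    intro he
    have : d.contains k = true := (PySem.Dict.contains_iff_mem_keys d k).2
      (he ▸ PySem.Dict.mem_keys_of_mem_items d hp)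
    simp [this] at h
  simp [hne]

theorem insert_insert_self (d : PySem.Dict String Int) (k : String) (v w : Int) :
    (d.insert k v).insert k w = d.insert k w := by
  apply PySem.Dict.ext
  by_cases h : d.contains k = true
  · rw [PySem.Dict.items_insert_of_contains _ _ (PySem.Dict.contains_insert_self d k v),
      PySem.Dict.items_insert_of_contains _ _ h, PySem.Dict.items_insert_of_contains _ _ h,
      List.map_map]
    apply List.map_congr_left; intro p hp
    by_cases hk : (p.1 == k) = true
    · have hpk : p.1 = k := by simpa using hk
      simp [Function.comp, hpk]
    · have hpk : p.1 ≠ k := by simpa using hk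
      simp [Function.comp, hpk]
  · have h' : d.contains k = false := by simpa using h
    rw [PySem.Dict.items_insert_of_contains _ _ (PySem.Dict.contains_insert_self d k v),
      PySem.Dict.items_insert_of_not_contains _ _ h', List.map_append,
      map_items_of_not_contains _ _ _ h',
      PySem.Dict.items_insert_of_not_contains _ _ h']
    simp

theorem insert_comm_left (d : PySem.Dict String Int) (k key : String) (v w : Int)
    (hne : k ≠ key) (hk : d.contains k = true) :
    (d.insert k v).insert key w = (d.insert key w).insert k v := by
  apply PySem.Dict.ext
  have hne' : key ≠ k := Ne.symm hne
  have hk1 : (d.insert key w).contains k = true := by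
    rw [PySem.Dict.contains_insert]; simp [hk]
  by_cases h : d.contains key = true
  · have hkey1 : (d.insert k v).contains key = true := by
      rw [PySem.Dict.contains_insert]; simp [h]
    rw [PySem.Dict.items_insert_of_contains _ _ hkey1,
      PySem.Dict.items_insert_of_contains _ _ hk, List.map_map,
      PySem.Dict.items_insert_of_contains _ _ hk1,
      PySem.Dict.items_insert_of_contains _ _ h, List.map_map]
    apply List.map_congr_left; intro p hp
    simp only [Function.comp_apply]
    by_cases h1 : (p.1 == k) = true
    · have hpk : p.1 = k := by simpa using h1
      simp [hpk, hne]
    · have hpk : p.1 ≠ k := by simpa using h1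
      by_cases h2 : (p.1 == key) = true
      · have hpk2 : p.1 = key := by simpa using h2
        simp [hpk2, hne']
      · have hpk2 : p.1 ≠ key := by simpa using h2
        simp [hpk, hpk2]
  · have h' : d.contains key = false := by simpa using h
    have hkey1 : (d.insert k v).contains key = false := by
      rw [PySem.Dict.contains_insert]; simp [h', hne']
    rw [PySem.Dict.items_insert_of_not_contains _ _ hkey1,
      PySem.Dict.items_insert_of_contains _ _ hk,
      PySem.Dict.items_insert_of_contains _ _ hk1,
      PySem.Dict.items_insert_of_not_contains _ _ h', List.map_append]
    simp [hne']

theorem bump_merge (d : PySem.Dict String Int) (k : String) (a b : Int) :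
    (d.modify k 0 (· + a)).modify k 0 (· + b) = d.modify k 0 (· + (a + b)) := by
  show (d.insert k (d.getD k 0 + a)).insert k ((d.insert k (d.getD k 0 + a)).getD k 0 + b)
      = d.insert k (d.getD k 0 + (a + b))
  rw [PySem.Dict.getD_insert_self, insert_insert_self, add_assoc]

theorem bump_comm (d : PySem.Dict String Int) (k k' : String) (a b : Int)
    (hne : k ≠ k') (hk : d.contains k = true) :
    (d.modify k 0 (· + a)).modify k' 0 (· + b) = (d.modify k' 0 (· + b)).modify k 0 (· + a) := by
  show (d.insert k (d.getD k 0 + a)).insert k' ((d.insert k (d.getD k 0 + a)).getD k' 0 + b)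
      = (d.insert k' (d.getD k' 0 + b)).insert k ((d.insert k' (d.getD k' 0 + b)).getD k 0 + a)
  rw [PySem.Dict.getD_insert_of_ne _ _ _ (Ne.symm hne),
    PySem.Dict.getD_insert_of_ne _ _ _ hne, insert_comm_left _ _ _ _ _ hne hk]

theorem insert_bump_comm (d : PySem.Dict String Int) (k key : String) (a : Int)
    (hne : k ≠ key) (hk : d.contains k = true) :
    (d.modify k 0 (· + a)).insert key 0 = (d.insert key 0).modify k 0 (· + a) := by
  show (d.insert k (d.getD k 0 + a)).insert key 0
      = (d.insert key 0).insert k ((d.insert key 0).getD k 0 + a)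
  rw [PySem.Dict.getD_insert_of_ne _ _ _ hne, insert_comm_left _ _ _ _ _ hne hk]

theorem bump_zero (d : PySem.Dict String Int) (k : String)
    (hk : d.contains k = true) (hnd : d.keys.Nodup) :
    d.modify k 0 (· + 0) = d := by
  show d.insert k (d.getD k 0 + 0) = d
  rw [add_zero]
  apply PySem.Dict.ext
  rw [PySem.Dict.items_insert_of_contains _ _ hk]
  conv_rhs => rw [← List.map_id d.items]
  apply List.map_congr_left; intro p hp
  by_cases h1 : (p.1 == k) = true
  · have hpk : p.1 = k := by simpa using h1
    have hv : d.getD k 0 = p.2 := by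
      have := PySem.Dict.getD_of_mem_items d (k := p.1) (v := p.2) hp hnd 0
      rw [hpk] at this; exact this
    obtain ⟨p1, p2⟩ := p
    simp only at hpk hv
    subst hpk
    simp [hv]
  · simp [h1]

-- ---------- addAll lemmas ----------

theorem addAll_append (ks₁ ks₂ : List String) (S : Int) (d : PySem.Dict String Int) :
    addAll (ks₁ ++ ks₂) S d = addAll ks₂ S (addAll ks₁ S d) := by
  unfold addAll; rw [List.foldl_append]

theorem nodup_bump (d : PySem.Dict String Int) (k : String) (f : Int → Int)
    (h : d.keys.Nodup) : (d.modify k 0 f).keys.Nodup := by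
  rw [PySem.Dict.keys_modify]
  exact PySem.Dict.nodup_keys_insert _ _ _ h

theorem contains_bump (d : PySem.Dict String Int) (k k' : String) (f : Int → Int)
    (h : d.contains k' = true) : (d.modify k 0 f).contains k' = true := by
  rw [PySem.Dict.contains_modify]; simp [h]

theorem contains_addAll (ks : List String) (S : Int) (d : PySem.Dict String Int) (k : String)
    (h : d.contains k = true) : (addAll ks S d).contains k = true := by
  induction ks generalizing d with
  | nil => exact h
  | cons k' t ih => exact ih _ (contains_bump _ _ _ _ h)

theorem nodup_addAll (ks : List String) (S : Int) (d : PySem.Dict String Int)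
    (h : d.keys.Nodup) : (addAll ks S d).keys.Nodup := by
  induction ks generalizing d with
  | nil => exact h
  | cons k' t ih => exact ih _ (nodup_bump _ _ _ h)

theorem addAll_zero (ks : List String) (d : PySem.Dict String Int)
    (hc : ∀ k ∈ ks, d.contains k = true) (hnd : d.keys.Nodup) :
    addAll ks 0 d = d := by
  induction ks generalizing d with
  | nil => rfl
  | cons k t ih =>
      show addAll t 0 (d.modify k 0 (· + 0)) = d
      rw [bump_zero d k (hc k (by simp)) hnd]
      exact ih d (fun k' hk' => hc k' (by simp [hk'])) hnd

theorem bump_addAll_comm (ks : List String) (k : String) (a S : Int) (d : PySem.Dict String Int)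
    (hne : ∀ k' ∈ ks, k ≠ k') (hk : d.contains k = true) :
    addAll ks S (d.modify k 0 (· + a)) = (addAll ks S d).modify k 0 (· + a) := by
  induction ks generalizing d with
  | nil => rfl
  | cons k' t ih =>
      show addAll t S ((d.modify k 0 (· + a)).modify k' 0 (· + S))
          = (addAll t S (d.modify k' 0 (· + S))).modify k 0 (· + a)
      rw [bump_comm d k k' a S (hne k' (by simp)) hk]
      exact ih (d.modify k' 0 (· + S)) (fun x hx => hne x (by simp [hx]))
        (contains_bump _ _ _ _ hk)

theorem addAll_merge (ks : List String) (a b : Int) (d : PySem.Dict String Int)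
    (hp : ks.Pairwise (· ≠ ·)) (hc : ∀ k ∈ ks, d.contains k = true) :
    addAll ks a (addAll ks b d) = addAll ks (a + b) d := by
  induction ks generalizing d with
  | nil => rfl
  | cons k t ih =>
      rw [List.pairwise_cons] at hp
      show addAll t a ((addAll t b (d.modify k 0 (· + b))).modify k 0 (· + a))
          = addAll t (a + b) (d.modify k 0 (· + (a + b)))
      rw [← bump_addAll_comm t k a b _ hp.1 (contains_bump _ _ _ _ (hc k (by simp))),
        bump_merge, Int.add_comm b a]
      exact ih (d.modify k 0 (· + (a + b))) hp.2
        (fun x hx => contains_bump _ _ _ _ (hc x (by simp [hx])))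

-- ---------- keysOf facts ----------

theorem join_lt_concat (cur : List String) (name : String) (h : cur ≠ []) :
    (PySem.Str.join "/" cur).length < (PySem.Str.join "/" (cur ++ [name])).length := by
  rw [join_concat _ _ h]
  have h1 : ("/" : String).length = 1 := rfl
  simp only [String.length_append, h1]
  omega

theorem ne_of_len_lt {s t : String} (h : s.length < t.length) : s ≠ t := by
  intro he; subst he; omega

theorem keysOf_concat (cur : List String) (x : String) :
    keysOf (cur ++ [x]) = keysOf cur ++ [PySem.Str.join "/" (cur ++ [x])] := by
  unfold keysOf
  rw [List.length_append, List.length_singleton, List.range_succ, List.map_append]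
  congr 1
  · apply List.map_congr_left
    intro i hi
    simp only [List.mem_range] at hi
    rw [List.take_append_of_le_length (by omega)]
  · simp only [List.map_cons, List.map_nil]
    rw [List.take_of_length_le (by simp)]

theorem keysOf_step (cur : List String) (k : Nat) (h : k + 1 < cur.length) :
    (PySem.Str.join "/" (cur.take (k + 1))).length
      < (PySem.Str.join "/" (cur.take (k + 2))).length := by
  have hget : cur.take (k + 2) = cur.take (k + 1) ++ [cur[k + 1]] := by
    rw [List.take_add_one, List.getElem?_eq_getElem h]
    rfl
  rw [hget]
  apply join_lt_concat
  intro hnil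
  have hlen : (List.take (k + 1) cur).length = 0 := by rw [hnil]; rfl
  rw [List.length_take] at hlen
  omega

theorem keysOf_len_mono (cur : List String) (i j : Nat) (hij : i < j) (hj : j < cur.length) :
    (PySem.Str.join "/" (cur.take (i + 1))).length < (PySem.Str.join "/" (cur.take (j + 1))).length := by
  induction j with
  | zero => omega
  | succ j ihj =>
      rcases Nat.lt_or_ge i j with h | h
      · exact lt_trans (ihj h (by omega)) (keysOf_step cur j hj)
      · have : i = j := by omega
        subst this
        exact keysOf_step cur i hj

theorem keysOf_le_join (cur : List String) (k : String) (hk : k ∈ keysOf cur) :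
    k.length ≤ (PySem.Str.join "/" cur).length := by
  unfold keysOf at hk
  obtain ⟨i, hi, rfl⟩ := List.mem_map.1 hk
  simp only [List.mem_range] at hi
  have hcur : cur.take cur.length = cur := List.take_of_length_le (le_refl _)
  rcases Nat.lt_or_ge (i + 1) cur.length with h | h
  · have := keysOf_len_mono cur i (cur.length - 1) (by omega) (by omega)
    rw [show cur.length - 1 + 1 = cur.length by omega, hcur] at this
    omega
  · rw [List.take_of_length_le (by omega)]

theorem keysOf_pairwise (cur : List String) : (keysOf cur).Pairwise (· ≠ ·) := by
  rw [List.pairwise_iff_getElem]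
  intro i j hi hj hij
  unfold keysOf at hi hj ⊢
  simp only [List.length_map, List.length_range] at hi hj
  simp only [List.getElem_map, List.getElem_range]
  exact ne_of_len_lt (keysOf_len_mono cur i j hij hj)

-- ---------- walkB preservation ----------

theorem walkB_contains_mono (fuel : Nat) : ∀ (lines : List String) (p : Option String)
    (d : PySem.Dict String Int) (k : String), d.contains k = true →
    ((walkB fuel lines p d).2.2).contains k = true := by
  induction fuel with
  | zero =>
      intro lines p d k h
      cases lines <;> simpa [walkB] using h
  | succ f ih =>
      intro lines p d k h
      cases lines with
      | nil => simpa [walkB] using h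
      | cons line rest =>
          simp only [walkB]
          split_ifs with h1 h2 h3
          · exact h
          · dsimp only
            exact ih _ _ _ _ (contains_bump _ _ _ _ (ih _ _ _ _ (by
              rw [PySem.Dict.contains_insert]; simp [h])))
          · dsimp only
            exact ih _ _ _ _ h
          · exact ih _ _ _ _ h

theorem walkB_nodup (fuel : Nat) : ∀ (lines : List String) (p : Option String)
    (d : PySem.Dict String Int), d.keys.Nodup → ((walkB fuel lines p d).2.2).keys.Nodup := by
  induction fuel with
  | zero =>
      intro lines p d h
      cases lines <;> simpa [walkB] using h
  | succ f ih =>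
      intro lines p d h
      cases lines with
      | nil => simpa [walkB] using h
      | cons line rest =>
          simp only [walkB]
          split_ifs with h1 h2 h3
          · exact h
          · dsimp only
            exact ih _ _ _ (nodup_bump _ _ _ (ih _ _ _ (PySem.Dict.nodup_keys_insert _ _ _ h)))
          · dsimp only
            exact ih _ _ _ h
          · exact ih _ _ _ h

theorem walkB_frame (fuel : Nat) : ∀ (lines : List String) (p : String)
    (d : PySem.Dict String Int) (k : String) (a : Int),
    d.keys.Nodup → d.contains k = true → k.length ≤ p.length →
    walkB fuel lines (some p) (d.modify k 0 (· + a)) =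
      ((walkB fuel lines (some p) d).1, (walkB fuel lines (some p) d).2.1,
       ((walkB fuel lines (some p) d).2.2).modify k 0 (· + a)) := by
  induction fuel with
  | zero =>
      intro lines p d k a hnd hk hlen
      cases lines <;> simp [walkB]
  | succ f ih =>
      intro lines p d k a hnd hk hlen
      cases lines with
      | nil => simp [walkB]
      | cons line rest =>
          simp only [walkB]
          split_ifs with h1 h2 h3
          · rfl
          · dsimp only
            simp only [mkKey]
            set name := (PySem.List.pyGet? (PySem.Str.split₀ line) 2).getD "" with hname
            set key := p ++ "/" ++ name with hkey
            have hklt : k.length < key.length := by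
              rw [hkey]
              have hslash : ("/" : String).length = 1 := rfl
              simp only [String.length_append, hslash]
              omega
            have hkne : k ≠ key := ne_of_len_lt hklt
            have hcontains_ins : (d.insert key 0).contains k = true := by
              rw [PySem.Dict.contains_insert]; simp [hk]
            rw [insert_bump_comm d k key a hkne hk,
              ih rest key (d.insert key 0) k a (PySem.Dict.nodup_keys_insert _ _ _ hnd)
                hcontains_ins (le_of_lt hklt)]
            dsimp only
            rw [bump_comm _ k key a _ hkne
              (walkB_contains_mono f rest (some key) (d.insert key 0) k hcontains_ins),
              ih _ p _ k a
                (nodup_bump _ _ _ (walkB_nodup f rest (some key) _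
                  (PySem.Dict.nodup_keys_insert _ _ _ hnd)))
                (contains_bump _ _ _ _
                  (walkB_contains_mono f rest (some key) (d.insert key 0) k hcontains_ins))
                hlen]
          · dsimp only
            rw [ih rest p d k a hnd hk hlen]
          · exact ih rest p d k a hnd hk hlen

theorem walkB_frame_addAll (fuel : Nat) (lines : List String) (p : String) :
    ∀ (ks : List String) (d : PySem.Dict String Int) (S : Int),
    d.keys.Nodup → (∀ k ∈ ks, d.contains k = true) →
    (∀ k ∈ ks, k.length ≤ p.length) →
    walkB fuel lines (some p) (addAll ks S d) =
      ((walkB fuel lines (some p) d).1, (walkB fuel lines (some p) d).2.1,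
       addAll ks S ((walkB fuel lines (some p) d).2.2)) := by
  intro ks
  induction ks with
  | nil => intro d S _ _ _; rfl
  | cons k t ih =>
      intro d S hnd hc hlen
      show walkB fuel lines (some p) (addAll t S (d.modify k 0 (· + S))) = _
      rw [ih (d.modify k 0 (· + S)) S (nodup_bump _ _ _ hnd)
        (fun x hx => contains_bump _ _ _ _ (hc x (by simp [hx])))
        (fun x hx => hlen x (by simp [hx])),
        walkB_frame fuel lines p d k S hnd (hc k (by simp)) (hlen k (by simp))]
      rfl

-- ---------- the main invariant ----------

theorem walkB_frame_keysOf (fuel : Nat) (lines : List String) (cur : List String)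
    (d : PySem.Dict String Int) (S : Int) (hnd : d.keys.Nodup)
    (hc : ∀ k ∈ keysOf cur, d.contains k = true) :
    walkB fuel lines (optKey cur) (addAll (keysOf cur) S d) =
      ((walkB fuel lines (optKey cur) d).1, (walkB fuel lines (optKey cur) d).2.1,
       addAll (keysOf cur) S ((walkB fuel lines (optKey cur) d).2.2)) := by
  by_cases h : cur = []
  · subst h
    show walkB fuel lines (optKey []) d = _
    rfl
  · have hopt : optKey cur = some (PySem.Str.join "/" cur) := by simp [optKey, h]
    rw [hopt]
    exact walkB_frame_addAll fuel lines _ (keysOf cur) d S hnd hc (keysOf_le_join cur)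

theorem kf_ne_keysOf (cur : List String) (name : String) (k' : String)
    (hk' : k' ∈ keysOf cur) : PySem.Str.join "/" (cur ++ [name]) ≠ k' := by
  by_cases h : cur = []
  · subst h; simp [keysOf] at hk'
  · exact Ne.symm (ne_of_len_lt
      (lt_of_le_of_lt (keysOf_le_join cur k' hk') (join_lt_concat cur name h)))

theorem walkB_main (fuel : Nat) : ∀ (lines : List String) (d : PySem.Dict String Int)
    (cur : List String), lines.length ≤ fuel → d.keys.Nodup →
    (∀ k ∈ keysOf cur, d.contains k = true) →
    ((∃ body pop, lines = body ++ pop :: (walkB fuel lines (optKey cur) d).2.1 ∧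
        pvIsPop pop = true ∧
        body.countP (fun l => pvIsPop l) = body.countP (fun l => pvIsPush l) ∧
        lines.foldl calcA_step (d, cur) =
          ((walkB fuel lines (optKey cur) d).2.1).foldl calcA_step
            (addAll (keysOf cur) (walkB fuel lines (optKey cur) d).1
              (walkB fuel lines (optKey cur) d).2.2, cur.dropLast))
     ∨ ((walkB fuel lines (optKey cur) d).2.1 = [] ∧
        (lines.foldl calcA_step (d, cur)).1 =
          addAll (keysOf cur) (walkB fuel lines (optKey cur) d).1
            (walkB fuel lines (optKey cur) d).2.2)) := by
  induction fuel with
  | zero =>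
      intro lines d cur hlen hnd hc
      have hnil : lines = [] := by
        cases lines with
        | nil => rfl
        | cons a b => simp at hlen
      subst hnil
      right
      refine ⟨rfl, ?_⟩
      show d = addAll (keysOf cur) 0 d
      exact (addAll_zero _ _ hc hnd).symm
  | succ f ih =>
      intro lines d cur hlen hnd hc
      cases lines with
      | nil =>
          right
          refine ⟨rfl, ?_⟩
          show d = addAll (keysOf cur) 0 d
          exact (addAll_zero _ _ hc hnd).symm
      | cons line rest =>
          have hrest : rest.length ≤ f := by simpa using hlen
          by_cases h1 : PySem.Str.startswith line "$ cd .." = true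
          · -- "$ cd .." : the body of this directory ends here
            have hw : walkB (f + 1) (line :: rest) (optKey cur) d = (0, rest, d) := by
              simp only [walkB, if_pos h1]
            rw [hw]
            left
            refine ⟨[], line, by simp, h1, rfl, ?_⟩
            rw [List.foldl_cons]
            have hstep : calcA_step (d, cur) line = (d, cur.dropLast) := by
              simp only [calcA_step, if_pos h1, popA_eq_dropLast]
            rw [hstep, addAll_zero _ _ hc hnd]
          · by_cases h2 : PySem.Str.startswith line "$ cd" = true
            · -- "$ cd <name>" : recurse into the subdirectory, then continue
              set name := (PySem.List.pyGet? (PySem.Str.split₀ line) 2).getD "" with hname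
              set kf := PySem.Str.join "/" (cur ++ [name]) with hkf
              have hkeq : mkKey (optKey cur) name = kf := key_eq cur name
              have hopt' : optKey (cur ++ [name]) = some kf := by
                rw [hkf]; simp [optKey]
              set R1 := walkB f rest (some kf) (d.insert kf 0) with hR1
              set d2 := R1.2.2.modify kf 0 (· + R1.1) with hd2
              set R2 := walkB f R1.2.1 (optKey cur) d2 with hR2
              have hw : walkB (f + 1) (line :: rest) (optKey cur) d
                  = (R1.1 + R2.1, R2.2.1, R2.2.2) := by
                simp only [walkB, if_neg h1, if_pos h2, ← hname, hkeq]
                rfl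
              have hstep : calcA_step (d, cur) line = (d.insert kf 0, cur ++ [name]) := by
                simp only [calcA_step, if_neg h1, if_pos h2, ← hname, hkf]
              -- membership / nodup bookkeeping
              have hcontains_ins : ∀ k ∈ keysOf (cur ++ [name]),
                  (d.insert kf 0).contains k = true := by
                intro k hk
                rw [keysOf_concat, ← hkf] at hk
                rcases List.mem_append.1 hk with hk | hk
                · rw [PySem.Dict.contains_insert]; simp [hc k hk]
                · simp at hk
                  subst hk
                  exact PySem.Dict.contains_insert_self _ _ _
              have hnd_ins : (d.insert kf 0).keys.Nodup := PySem.Dict.nodup_keys_insert _ _ _ hnd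
              have hkf_R1 : R1.2.2.contains kf = true :=
                walkB_contains_mono f rest (some kf) _ kf (PySem.Dict.contains_insert_self _ _ _)
              have hks_R1 : ∀ k ∈ keysOf cur, R1.2.2.contains k = true := fun k hk =>
                walkB_contains_mono f rest (some kf) _ k
                  (by rw [PySem.Dict.contains_insert]; simp [hc k hk])
              have hnd_R1 : R1.2.2.keys.Nodup := walkB_nodup f rest (some kf) _ hnd_ins
              have hks_d2 : ∀ k ∈ keysOf cur, d2.contains k = true := fun k hk =>
                contains_bump _ _ _ _ (hks_R1 k hk)
              have hnd_d2 : d2.keys.Nodup := nodup_bump _ _ _ hnd_R1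
              have hne : ∀ k' ∈ keysOf cur, kf ≠ k' := fun k' hk' =>
                hkf ▸ kf_ne_keysOf cur name k' hk'
              -- converting the inner level's addAll to the outer level's
              have hconv : addAll (keysOf (cur ++ [name])) R1.1 R1.2.2
                  = addAll (keysOf cur) R1.1 d2 := by
                rw [keysOf_concat, ← hkf, addAll_append]
                show (addAll (keysOf cur) R1.1 R1.2.2).modify kf 0 (· + R1.1)
                    = addAll (keysOf cur) R1.1 d2
                rw [← bump_addAll_comm (keysOf cur) kf R1.1 R1.1 R1.2.2 hne hkf_R1]
              have hIH1 := ih rest (d.insert kf 0) (cur ++ [name]) hrest hnd_ins hcontains_ins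
              rw [hopt', ← hR1, hconv, List.dropLast_concat] at hIH1
              rcases hIH1 with ⟨body1, pop1, heq1, hpop1, hcnt1, hfold1⟩ | ⟨hnil1, hdict1⟩
              · -- the subdirectory body ends with its own "$ cd .."; continue at this level
                have hrem1 : R1.2.1.length ≤ f := by
                  have : rest.length = body1.length + 1 + R1.2.1.length := by
                    rw [heq1]; simp; omega
                  omega
                have hfr := walkB_frame_keysOf f R1.2.1 cur d2 R1.1 hnd_d2 hks_d2
                have hIH2 := ih R1.2.1 (addAll (keysOf cur) R1.1 d2) cur hrem1
                  (nodup_addAll _ _ _ hnd_d2)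
                  (fun k hk => contains_addAll _ _ _ _ (hks_d2 k hk))
                rw [hfr, ← hR2] at hIH2
                have hks_R2 : ∀ k ∈ keysOf cur, R2.2.2.contains k = true := fun k hk =>
                  walkB_contains_mono f R1.2.1 (optKey cur) d2 k (hks_d2 k hk)
                have hmerge : addAll (keysOf cur) R2.1 (addAll (keysOf cur) R1.1 R2.2.2)
                    = addAll (keysOf cur) (R1.1 + R2.1) R2.2.2 := by
                  rw [addAll_merge _ _ _ _ (keysOf_pairwise cur) hks_R2, Int.add_comm]
                rcases hIH2 with ⟨body2, pop2, heq2, hpop2, hcnt2, hfold2⟩ | ⟨hnil2, hdict2⟩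
                · rw [hw]
                  left
                  refine ⟨line :: (body1 ++ pop1 :: body2), pop2, ?_, hpop2, ?_, ?_⟩
                  · simp only [List.cons_append, List.append_assoc, List.cons_append]
                    rw [heq1, heq2]
                  · have hpopline : pvIsPop line = false := by
                      unfold pvIsPop; simpa using h1
                    have h1' : PySem.Str.startswith line "$ cd .." = false := by
                      simpa using h1
                    have hpushline : pvIsPush line = true := by
                      unfold pvIsPush pvIsPop
                      rw [h1', h2]
                      rfl
                    have hpop1' : pvIsPush pop1 = false := by
                      unfold pvIsPush; simp [hpop1]
                    simp only [List.countP_cons, List.countP_append, hpopline, hpushline,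
                      hpop1, hpop1']
                    omega
                  · rw [List.foldl_cons, hstep, hfold1, hfold2, hmerge]
                · rw [hw]
                  right
                  refine ⟨hnil2, ?_⟩
                  rw [List.foldl_cons, hstep, hfold1, hdict2, hmerge]
              · -- the subdirectory body ran to the end of input: nothing left after it
                have hr2 : R2 = (0, [], d2) := by
                  rw [hR2, hnil1]
                  cases f <;> rfl
                rw [hw, hr2]
                dsimp only
                right
                refine ⟨rfl, ?_⟩
                rw [List.foldl_cons, hstep, hdict1, Int.add_zero]
            · -- a plain output line: maybe a file size
              set tok := (PySem.List.pyGet? (PySem.Str.split₀ line) 0).getD "" with htok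
              have hpopline : pvIsPop line = false := by unfold pvIsPop; simpa using h1
              have h2' : PySem.Str.startswith line "$ cd" = false := by simpa using h2
              have hpushline : pvIsPush line = false := by
                unfold pvIsPush; rw [h2']; simp
              by_cases h3 : PySem.Str.strIsdigit tok = true
              · -- size line: A bumps every ancestor, B counts it into the local total
                set tv := (PySem.Int.ofStr? tok).getD 0 with htv
                set R := walkB f rest (optKey cur) d with hR
                have hw : walkB (f + 1) (line :: rest) (optKey cur) d
                    = (tv + R.1, R.2.1, R.2.2) := by
                  simp only [walkB, if_neg h1, if_neg h2, ← htok, if_pos h3, ← htv]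
                  rfl
                have hstep : calcA_step (d, cur) line = (addAll (keysOf cur) tv d, cur) := by
                  simp only [calcA_step, if_neg h1, if_neg h2, ← htok, if_pos h3, ← htv,
                    sizeLoop_eq]
                have hfr := walkB_frame_keysOf f rest cur d tv hnd hc
                have hIH := ih rest (addAll (keysOf cur) tv d) cur hrest
                  (nodup_addAll _ _ _ hnd) (fun k hk => contains_addAll _ _ _ _ (hc k hk))
                rw [hfr, ← hR] at hIH
                have hks_R : ∀ k ∈ keysOf cur, R.2.2.contains k = true := fun k hk =>
                  walkB_contains_mono f rest (optKey cur) d k (hc k hk)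
                have hmerge : addAll (keysOf cur) R.1 (addAll (keysOf cur) tv R.2.2)
                    = addAll (keysOf cur) (tv + R.1) R.2.2 := by
                  rw [addAll_merge _ _ _ _ (keysOf_pairwise cur) hks_R, Int.add_comm]
                rcases hIH with ⟨body', pop', heq', hpop', hcnt', hfold'⟩ | ⟨hnil', hdict'⟩
                · rw [hw]
                  left
                  refine ⟨line :: body', pop', by rw [heq']; rfl, hpop', ?_, ?_⟩
                  · simp only [List.countP_cons, hpopline, hpushline]
                    omega
                  · rw [List.foldl_cons, hstep, hfold', hmerge]
                · rw [hw]
                  right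
                  refine ⟨hnil', ?_⟩
                  rw [List.foldl_cons, hstep, hdict', hmerge]
              · -- ignored line ("$ ls", "dir x", ...)
                set R := walkB f rest (optKey cur) d with hR
                have hw : walkB (f + 1) (line :: rest) (optKey cur) d = R := by
                  simp only [walkB, if_neg h1, if_neg h2, ← htok, if_neg h3]
                  rw [hR]
                have hstep : calcA_step (d, cur) line = (d, cur) := by
                  simp only [calcA_step, if_neg h1, if_neg h2, ← htok, if_neg h3]
                have hIH := ih rest d cur hrest hnd hc
                rw [← hR] at hIH
                rcases hIH with ⟨body', pop', heq', hpop', hcnt', hfold'⟩ | ⟨hnil', hdict'⟩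
                · rw [hw]
                  left
                  refine ⟨line :: body', pop', by rw [heq']; rfl, hpop', ?_, ?_⟩
                  · simp only [List.countP_cons, hpopline, hpushline]
                    omega
                  · rw [List.foldl_cons, hstep, hfold']
                · rw [hw]
                  right
                  refine ⟨hnil', ?_⟩
                  rw [List.foldl_cons, hstep, hdict']

-- ===== VERDICT (by name: the statement is the Claim_ definition above) =====
theorem calc_directory_sizes_spec : Claim_equal_calc_directory_sizes := by
  intro cmds _ hpre
  unfold Spec_calc_directory_sizes calc_directory_sizes calc_directory_sizes_alt
  obtain ⟨-, -, h3⟩ := hpre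
  have hmain := walkB_main cmds.length cmds PySem.Dict.empty [] (le_refl _)
    (PySem.Dict.nodup_keys_empty) (by simp [keysOf])
  set W := walkB cmds.length cmds (optKey []) PySem.Dict.empty with hW
  rcases hmain with ⟨body, pop, heq, hpop, hcnt, -⟩ | ⟨-, hdict⟩
  · -- an unmatched "$ cd .." would make A pop an empty stack: excluded by Pre_
    exfalso
    have hlen := congrArg List.length heq
    simp only [List.length_append, List.length_cons] at hlen
    have hi : body.length < cmds.length := by omega
    have hget : cmds[body.length]'hi = pop := by
      simp only [heq]
      rw [List.getElem_append_right (le_refl body.length)]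
      simp
    have htake : cmds.take body.length = body := by
      rw [heq, List.take_left]
    have := h3 body.length hi (by rw [hget]; exact hpop)
    rw [htake] at this
    omega
  · exact congrArg PySem.Dict.items hdict
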